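-- pv_equiv track=rewrite | github.com/KhaleesiDragons/Python | PythonTask.py | getListWithoutDelimeters
-- ===== SOURCE A (Python) =====
-- def getListWithoutDelimeters(arr):
--     pole=arr
--     for item in pole:
--         if item.isnumeric()==False:
--             if item != ",":
--                 modify=pole.replace(item,',')
--                 pole=modify
--     pole2 = pole.split(',')
--     return pole2
-- ===== SOURCE B (Python) =====
-- def getListWithoutDelimeters(arr):
--     res = []
--     buf = ''
--     for ch in arr:
--         if ch.isnumeric():
--             buf += ch
--         else:
--             res.append(buf)
--             buf = ''
--     res.append(buf)
--     return res
-- ===== Notes on version B (the rewrite author's own statement) =====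
-- stated objective: faster
-- what changed: Replaces A's repeated whole-string str.replace calls (one full rescan per character) followed by split(',') with a single left-to-right pass that accumulates digit runs in a buffer and emits a token at each non-numeric character.
import Mathlib
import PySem

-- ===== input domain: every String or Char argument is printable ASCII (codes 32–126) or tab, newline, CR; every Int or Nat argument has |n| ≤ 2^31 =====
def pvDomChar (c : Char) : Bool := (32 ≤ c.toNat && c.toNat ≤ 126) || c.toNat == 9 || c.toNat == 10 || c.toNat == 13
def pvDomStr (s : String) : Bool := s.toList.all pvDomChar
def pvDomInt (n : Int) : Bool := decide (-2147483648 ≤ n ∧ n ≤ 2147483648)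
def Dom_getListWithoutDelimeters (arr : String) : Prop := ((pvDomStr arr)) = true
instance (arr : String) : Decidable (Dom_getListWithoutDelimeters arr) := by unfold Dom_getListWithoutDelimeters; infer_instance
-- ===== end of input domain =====

-- B replaces A's repeated whole-string str.replace rescans + split(',') with one
-- left-to-right pass that buffers digit runs and emits a token at each non-digit.
-- On the ASCII domain str.isnumeric on a single char is exactly '0' ≤ c ≤ '9'
-- (PySem.Chars.isdigit), which both ports use.

-- ===== PORT A =====
-- Python iterates over the string object bound at loop entry (= arr), even
-- though pole is reassigned inside; hence the fold runs over arr.toList.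
def getListWithoutDelimeters (arr : String) : List String :=
  let pole := arr
  let pole := arr.toList.foldl
    (fun (pole : String) (item : Char) =>
      if (PySem.Chars.isdigit item) == false then
        if item ≠ ',' then
          let modify := PySem.Str.replace pole (String.singleton item) ","
          modify
        else pole
      else pole) pole
  -- pole.split(',') with the non-empty literal separator ","
  (PySem.Chars.splitOn pole.toList [',']).map String.ofList

-- ===== PORT B =====
def getListWithoutDelimeters_alt (arr : String) : List String :=
  let st := arr.toList.foldl
    (fun (st : List String × String) (ch : Char) =>
      if PySem.Chars.isdigit ch then (st.1, st.2.push ch)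
      else (st.1 ++ [st.2], "")) ([], "")
  st.1 ++ [st.2]

-- ===== PRECONDITION & SPEC =====
def Spec_getListWithoutDelimeters (arr : String) (out : List String) : Prop := out = getListWithoutDelimeters_alt arr
instance (arr : String) (out : List String) : Decidable (Spec_getListWithoutDelimeters arr out) := by unfold Spec_getListWithoutDelimeters; infer_instance

-- ===== CLAIM (what is proved, stated in full; the proofs are below) =====
def Claim_equal_getListWithoutDelimeters : Prop := ∀ (arr : String), Dom_getListWithoutDelimeters arr → Spec_getListWithoutDelimeters arr (getListWithoutDelimeters arr)

-- ===== LEMMAS AND PROOFS =====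

-- keep digits, turn everything else into the separator
def pvKeep (c : Char) : Char := if PySem.Chars.isdigit c then c else ','

-- split on ',' as (first token, remaining tokens)
def pvSplit1 : List Char → List Char × List (List Char)
  | [] => ([], [])
  | c :: t =>
    let p := pvSplit1 t
    if c = ',' then ([], p.1 :: p.2) else (c :: p.1, p.2)

theorem pv_replace_go_spec (c : Char) :
    ∀ (fuel : Nat) (l acc : List Char), l.length ≤ fuel →
      PySem.Chars.replace.go [c] [','] fuel l acc
        = acc.reverse ++ l.map (fun x => if x = c then ',' else x) := by
  intro fuel
  induction fuel with
  | zero =>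
    intro l acc h
    have : l = [] := List.eq_nil_of_length_eq_zero (Nat.le_zero.mp h)
    subst this
    simp [PySem.Chars.replace.go]
  | succ n ih =>
    intro l acc h
    cases l with
    | nil => simp [PySem.Chars.replace.go]
    | cons x t =>
      by_cases hx : x = c
      · subst hx
        have hpre : List.isPrefixOf [x] (x :: t) = true := by
          simp [List.isPrefixOf]
        simp only [PySem.Chars.replace.go, hpre, if_pos]
        rw [show List.drop [x].length (x :: t) = t from rfl,
          ih t _ (by simpa using Nat.le_of_succ_le_succ h)]
        simp
      · have hpre : List.isPrefixOf [c] (x :: t) = false := by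
          simp [List.isPrefixOf]
          exact fun h => hx h.symm
        simp only [PySem.Chars.replace.go, hpre]
        rw [ih t _ (by simpa using Nat.le_of_succ_le_succ h)]
        simp [hx]

theorem pv_replace_single (l : List Char) (c : Char) :
    PySem.Chars.replace l [c] [','] = l.map (fun x => if x = c then ',' else x) := by
  simp [PySem.Chars.replace, pv_replace_go_spec c l.length l [] (le_refl _)]

theorem pv_splitOn_go_spec :
    ∀ (fuel : Nat) (l cur : List Char) (acc : List (List Char)), l.length ≤ fuel →
      PySem.Chars.splitOn.go [','] fuel l cur acc
        = acc.reverse ++ (cur.reverse ++ (pvSplit1 l).1) :: (pvSplit1 l).2 := by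
  intro fuel
  induction fuel with
  | zero =>
    intro l cur acc h
    have : l = [] := List.eq_nil_of_length_eq_zero (Nat.le_zero.mp h)
    subst this
    simp [PySem.Chars.splitOn.go, pvSplit1]
  | succ n ih =>
    intro l cur acc h
    cases l with
    | nil => simp [PySem.Chars.splitOn.go, pvSplit1]
    | cons x t =>
      by_cases hx : x = ','
      · subst hx
        have hpre : List.isPrefixOf [','] (',' :: t) = true := by
          simp [List.isPrefixOf]
        simp only [PySem.Chars.splitOn.go, hpre, if_pos]
        rw [show List.drop [','].length (',' :: t) = t from rfl,
          ih t _ _ (by simpa using Nat.le_of_succ_le_succ h)]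
        simp [pvSplit1]
      · have hpre : List.isPrefixOf [','] (x :: t) = false := by
          simp [List.isPrefixOf]
          exact fun hcx => absurd hcx.symm hx
        simp only [PySem.Chars.splitOn.go, hpre]
        rw [ih t _ _ (by simpa using Nat.le_of_succ_le_succ h)]
        simp [pvSplit1, hx]

theorem pv_splitOn_comma (l : List Char) :
    PySem.Chars.splitOn l [','] = (pvSplit1 l).1 :: (pvSplit1 l).2 := by
  simp [PySem.Chars.splitOn, pv_splitOn_go_spec (l.length + 1) l [] []
    (Nat.le_succ _)]

-- A's fold: after processing `todo`, the string is s with every non-digit,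
-- non-comma char that occurs in todo replaced by ','
theorem pv_foldA_spec (todo : List Char) :
    ∀ (s : String),
      (todo.foldl
        (fun (pole : String) (item : Char) =>
          if (PySem.Chars.isdigit item) == false then
            if item ≠ ',' then
              let modify := PySem.Str.replace pole (String.singleton item) ","
              modify
            else pole
          else pole) s).toList
      = s.toList.map
          (fun c => if PySem.Chars.isdigit c = false ∧ c ≠ ',' ∧ c ∈ todo then ',' else c) := by
  induction todo with
  | nil => intro s; simp
  | cons item rest ih =>
    intro s
    by_cases hd : PySem.Chars.isdigit item
    · simp only [List.foldl_cons, hd]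
      rw [if_neg (by decide : ¬ ((true == false) = true))]
      rw [ih s]
      apply List.map_congr_left
      intro c _
      by_cases hc : PySem.Chars.isdigit c = false ∧ c ≠ ','
      · have hne : c ≠ item := by
          intro h; rw [h] at hc; simp [hd] at hc
        simp [hc.1, hc.2, hne]
      · by_cases h1 : PySem.Chars.isdigit c = false
        · have h2 : c = ',' := by
            by_contra h2; exact hc ⟨h1, h2⟩
          simp [h2]
        · simp [h1]
    · by_cases hcm : item = ','
      · subst hcm
        have hd' : PySem.Chars.isdigit ',' = false := by decide
        simp only [List.foldl_cons, hd']
        rw [if_pos (by decide : (false == false) = true)]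
        rw [if_neg (by simp : ¬ (',' ≠ ','))]
        rw [ih s]
        apply List.map_congr_left
        intro c _
        by_cases h1 : PySem.Chars.isdigit c = false
        · by_cases h2 : c = ','
          · simp [h2]
          · simp [h1, h2]
        · simp [h1]
      · have hd' : PySem.Chars.isdigit item = false := by simpa using hd
        simp only [List.foldl_cons, hd']
        rw [if_pos (by decide : (false == false) = true)]
        rw [if_pos (hcm : item ≠ ',')]
        rw [ih]
        rw [PySem.Str.toList_replace]
        have hsing : (String.singleton item).toList = [item] := by simp
        have hcomma : ("," : String).toList = [','] := by decide
        rw [hsing, hcomma, pv_replace_single, List.map_map]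
        apply List.map_congr_left
        intro c _
        by_cases hci : c = item
        · subst hci
          have h1 : PySem.Chars.isdigit c = false := by simpa using hd
          simp [Function.comp, h1, hcm]
        · by_cases h1 : PySem.Chars.isdigit c = false
          · by_cases h2 : c = ','
            · simp [Function.comp, h2]
            · by_cases h3 : c ∈ rest <;> simp [Function.comp, hci, h1, h2, h3]
          · simp [Function.comp, hci, h1]

-- B's fold reduced to a plain recursion
def pvAltRec : List Char → String → List String
  | [], buf => [buf]
  | c :: t, buf =>
    if PySem.Chars.isdigit c then pvAltRec t (buf.push c) else buf :: pvAltRec t ""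

theorem pv_altFold (l : List Char) :
    ∀ (res : List String) (buf : String),
      (let st := l.foldl
        (fun (st : List String × String) (ch : Char) =>
          if PySem.Chars.isdigit ch then (st.1, st.2.push ch)
          else (st.1 ++ [st.2], "")) (res, buf)
       st.1 ++ [st.2])
      = res ++ pvAltRec l buf := by
  induction l with
  | nil => intro res buf; simp [pvAltRec]
  | cons c t ih =>
    intro res buf
    by_cases hc : PySem.Chars.isdigit c
    · simp only [List.foldl_cons, hc, if_pos, pvAltRec]
      exact ih res (buf.push c)
    · simp only [List.foldl_cons, hc, Bool.false_eq_true,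
        if_false, pvAltRec]
      rw [ih (res ++ [buf]) ""]
      simp

theorem pv_altRec_split1 (l : List Char) :
    ∀ (buf : String),
      pvAltRec l buf
        = String.ofList (buf.toList ++ (pvSplit1 (l.map pvKeep)).1)
            :: ((pvSplit1 (l.map pvKeep)).2).map String.ofList := by
  induction l with
  | nil => intro buf; simp [pvAltRec, pvSplit1]
  | cons c t ih =>
    intro buf
    by_cases hc : PySem.Chars.isdigit c
    · have hkeep : pvKeep c = c := by simp [pvKeep, hc]
      have hnc : c ≠ ',' := by
        intro h; rw [h] at hc; revert hc; decide
      simp only [pvAltRec, hc, if_pos, List.map_cons, hkeep, pvSplit1, hnc]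
      rw [ih (buf.push c)]
      simp
    · have hkeep : pvKeep c = ',' := by simp [pvKeep, hc]
      simp only [pvAltRec, hc, Bool.false_eq_true, if_false,
        List.map_cons, hkeep]
      rw [ih ""]
      simp [pvSplit1]

-- ===== VERDICT (by name: the statement is the Claim_ definition above) =====
theorem getListWithoutDelimeters_spec : Claim_equal_getListWithoutDelimeters := by
  intro arr _
  unfold Spec_getListWithoutDelimeters getListWithoutDelimeters getListWithoutDelimeters_alt
  simp only []
  rw [pv_altFold arr.toList [] ""]
  rw [pv_altRec_split1 arr.toList ""]
  have hA : (arr.toList.foldl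
      (fun (pole : String) (item : Char) =>
        if (PySem.Chars.isdigit item) == false then
          if item ≠ ',' then
            let modify := PySem.Str.replace pole (String.singleton item) ","
            modify
          else pole
        else pole) arr).toList
      = arr.toList.map pvKeep := by
    rw [pv_foldA_spec arr.toList arr]
    apply List.map_congr_left
    intro c hc
    by_cases h1 : PySem.Chars.isdigit c
    · simp [pvKeep, h1]
    · by_cases h2 : c = ','
      · simp [pvKeep, h2]
      · simp [pvKeep, h1, h2, hc]
  rw [hA, pv_splitOn_comma]
  simp
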